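-- pv_equiv track=rewrite | github.com/ad-freiburg/tokenization-repair | scripts/ocr_postprocess.py | get_space_positions
-- ===== SOURCE A (Python) =====
-- def get_space_positions(text):
--     i = 0
--     positions = []
--     for char in text:
--         if char == " ":
--             positions.append(i)
--         else:
--             i += 1
--     return positions
-- ===== SOURCE B (Python) =====
-- def get_space_positions(text):
--     parts = text.split(" ")[:-1]
--     positions = []
--     count = 0
--     for part in parts:
--         count += len(part)
--         positions.append(count)
--     return positions
-- ===== Notes on version B (the rewrite author's own statement) =====
-- stated objective: faster
-- what changed: B splits the text on single spaces and accumulates token lengths (one position per gap) instead of scanning character by character with a running non-space counter.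
import Mathlib
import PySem

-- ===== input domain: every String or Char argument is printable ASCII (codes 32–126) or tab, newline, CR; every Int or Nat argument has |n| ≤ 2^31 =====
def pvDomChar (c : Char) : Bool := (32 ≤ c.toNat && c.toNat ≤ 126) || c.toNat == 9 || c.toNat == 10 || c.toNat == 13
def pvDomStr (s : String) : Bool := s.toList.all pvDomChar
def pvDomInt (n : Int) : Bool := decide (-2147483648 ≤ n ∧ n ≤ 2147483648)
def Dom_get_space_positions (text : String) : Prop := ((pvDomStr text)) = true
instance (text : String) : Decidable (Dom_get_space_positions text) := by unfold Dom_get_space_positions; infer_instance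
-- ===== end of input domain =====

-- B splits on single spaces and accumulates token lengths instead of a char-by-char scan; same O(n) cost, different decomposition.

-- ===== PORT A =====
-- char-by-char loop: i counts non-space chars, spaces record the current i
def get_space_positions (text : String) : List Int :=
  (text.toList.foldl
    (fun (st : Int × List Int) c =>
      if c = ' ' then (st.1, st.2 ++ [st.1]) else (st.1 + 1, st.2))
    (0, [])).2

-- ===== PORT B =====
-- parts = text.split(" ")[:-1]; running count of non-space chars, one appended position per part
def get_space_positions_alt (text : String) : List Int :=
  (PySem.List.slice (PySem.Chars.splitOn text.toList [' ']) none (some (-1))).foldl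
    (fun (st : Int × List Int) part =>
      ((st.1 + (part.length : Int)), st.2 ++ [st.1 + (part.length : Int)]))
    (0, []) |>.2

-- ===== PRECONDITION & SPEC =====
def Spec_get_space_positions (text : String) (out : List Int) : Prop := out = get_space_positions_alt text
instance (text : String) (out : List Int) : Decidable (Spec_get_space_positions text out) := by unfold Spec_get_space_positions; infer_instance

-- ===== CLAIM (what is proved, stated in full; the proofs are below) =====
def Claim_equal_get_space_positions : Prop := ∀ (text : String), Dom_get_space_positions text → Spec_get_space_positions text (get_space_positions text)

-- ===== LEMMAS AND PROOFS =====

-- structural single-space split: pvSplit cs = Chars.splitOn cs [' ']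
def pvConsFirst {α : Type} (pre : List α) : List (List α) → List (List α)
  | [] => [pre]
  | p :: ps => (pre ++ p) :: ps

def pvSplit : List Char → List (List Char)
  | [] => [[]]
  | c :: cs => if c = ' ' then [] :: pvSplit cs else pvConsFirst [c] (pvSplit cs)

-- structural spec of A's loop result
def pvG : List Char → Int → List Int
  | [], _ => []
  | c :: cs, i => if c = ' ' then i :: pvG cs i else pvG cs (i + 1)

lemma pvConsFirst_consFirst {α : Type} (p q : List α) (xs : List (List α)) :
    pvConsFirst p (pvConsFirst q xs) = pvConsFirst (p ++ q) xs := by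
  cases xs <;> simp [pvConsFirst]

lemma pvSplit_ne_nil (cs : List Char) : pvSplit cs ≠ [] := by
  induction cs with
  | nil => simp [pvSplit]
  | cons c cs ih =>
    simp only [pvSplit]
    split
    · simp
    · cases h : pvSplit cs with
      | nil => exact absurd h ih
      | cons p ps => simp [pvConsFirst]

lemma pvGo_spec (fuel : Nat) (l cur : List Char) (acc : List (List Char))
    (h : l.length < fuel) :
    PySem.Chars.splitOn.go [' '] fuel l cur acc
      = acc.reverse ++ pvConsFirst cur.reverse (pvSplit l) := by
  induction fuel generalizing l cur acc with
  | zero => omega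
  | succ fuel ih =>
    cases l with
    | nil => simp [PySem.Chars.splitOn.go, pvSplit, pvConsFirst]
    | cons c rest =>
      simp only [PySem.Chars.splitOn.go]
      by_cases hc : c = ' '
      · subst hc
        have hpre : [' '].isPrefixOf (' ' :: rest) = true := by
          simp [List.isPrefixOf]
        rw [if_pos hpre]
        have hd : List.drop [' '].length (' ' :: rest) = rest := rfl
        rw [hd, ih rest [] (cur.reverse :: acc) (by simpa using Nat.lt_of_succ_lt_succ h)]
        cases hs : pvSplit rest with
        | nil => exact absurd hs (pvSplit_ne_nil rest)
        | cons p ps =>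
          simp [pvSplit, pvConsFirst, hs]
      · have hpre : [' '].isPrefixOf (c :: rest) = false := by
          simp only [List.isPrefixOf, Bool.and_eq_false_iff]
          exact Or.inl (beq_eq_false_iff_ne.mpr (Ne.symm hc))
        rw [if_neg (by rw [hpre]; simp)]
        rw [ih rest (c :: cur) acc (by simpa using Nat.lt_of_succ_lt_succ h)]
        simp [pvSplit, hc, pvConsFirst_consFirst]

lemma pvSplitOn_eq (cs : List Char) : PySem.Chars.splitOn cs [' '] = pvSplit cs := by
  unfold PySem.Chars.splitOn
  rw [pvGo_spec (cs.length + 1) cs [] [] (by omega)]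
  cases h : pvSplit cs with
  | nil => exact absurd h (pvSplit_ne_nil cs)
  | cons p ps => simp [pvConsFirst]

-- A's loop computes pos ++ pvG cs i
lemma pvA_loop (cs : List Char) (i : Int) (pos : List Int) :
    (cs.foldl
      (fun (st : Int × List Int) c =>
        if c = ' ' then (st.1, st.2 ++ [st.1]) else (st.1 + 1, st.2))
      (i, pos)).2 = pos ++ pvG cs i := by
  induction cs generalizing i pos with
  | nil => simp [pvG]
  | cons c cs ih =>
    by_cases hc : c = ' ' <;> simp [pvG, hc, ih]

-- B's loop over dropLast (pvConsFirst pre (pvSplit cs)) computes pos ++ pvG cs (i + pre.length)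
lemma pvB_loop (cs : List Char) (pre : List Char) (i : Int) (pos : List Int) :
    ((pvConsFirst pre (pvSplit cs)).dropLast.foldl
      (fun (st : Int × List Int) part =>
        ((st.1 + (part.length : Int)), st.2 ++ [st.1 + (part.length : Int)]))
      (i, pos)).2 = pos ++ pvG cs (i + pre.length) := by
  induction cs generalizing pre i pos with
  | nil => simp [pvSplit, pvConsFirst, pvG]
  | cons c cs ih =>
    by_cases hc : c = ' '
    · subst hc
      have h1 : pvConsFirst pre ([] :: pvSplit cs) = pre :: pvSplit cs := by
        simp [pvConsFirst]
      have h2 : (pre :: pvSplit cs).dropLast = pre :: (pvSplit cs).dropLast := by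
        cases h : pvSplit cs with
        | nil => exact absurd h (pvSplit_ne_nil cs)
        | cons p ps => simp
      have hsplit : pvSplit (' ' :: cs) = [] :: pvSplit cs := by simp [pvSplit]
      rw [hsplit, h1, h2, List.foldl_cons]
      have := ih ([]) (i + pre.length) (pos ++ [i + pre.length])
      simp only [pvConsFirst] at this ⊢
      cases h : pvSplit cs with
      | nil => exact absurd h (pvSplit_ne_nil cs)
      | cons p ps =>
        simp only [h] at this ⊢
        simp only [List.nil_append] at this
        rw [this]
        simp [pvG]
    · simp only [pvSplit, if_neg hc, pvConsFirst_consFirst]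
      rw [ih (pre ++ [c]) i pos]
      simp [pvG, hc]
      ring_nf

lemma pvSlice_dropLast {α : Type} (xs : List α) :
    PySem.List.slice xs none (some (-1)) = xs.dropLast := by
  simp [PySem.List.slice]
  rw [List.dropLast_eq_take]

-- ===== VERDICT (by name: the statement is the Claim_ definition above) =====
theorem get_space_positions_spec : Claim_equal_get_space_positions := by
  intro text _
  unfold Spec_get_space_positions get_space_positions get_space_positions_alt
  rw [pvSplitOn_eq, pvSlice_dropLast, pvA_loop]
  have h := pvB_loop text.toList [] 0 []
  simp only [pvConsFirst] at h
  cases hs : pvSplit text.toList with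
  | nil => exact absurd hs (pvSplit_ne_nil text.toList)
  | cons p ps =>
    simp only [hs] at h
    simp only [List.nil_append] at h
    rw [h]
    simp
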